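-- pv_equiv track=rewrite | github.com/tfcp68/manual-projects | Исходники/Глава 2. Часть 1/Динамическое программирование1/Динамическое программирование1/Табличный метод/21. Зоомагазин/Python/petshop_matrix.py | petshop_matrix_back
-- ===== SOURCE A (Python) =====
-- def petshop_matrix_back(n):
--     if n < 0:
--         return -1
--     a = [[0 for i in range(n)] for j in range(n)]
--     for i in range(n):
--         for j in range(i, n):
--             if j == 0 and i == 0:
--                 a[i][j] = 1
--             elif i == 0:
--                 a[i][j] = 2 ** (j - 1)
--             else:
--                 a[i][j] = a[i - 1][j - 1]
--     sum_3 = 0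
--     for i in range(2, n):
--         for j in range(i, n):
--             sum_3 += a[i][j]
--     answer = 2**n - sum_3
--     if n == 0:
--         answer = 0
--     return answer
-- ===== SOURCE B (Python) =====
-- def petshop_matrix_back(n):
--     # Closed form: the DP table's triangular sum equals 2**(n-2) - 1 for n >= 2,
--     # so the answer is 2**n - 2**(n-2) + 1; no table is built.
--     if n < 0:
--         return -1
--     if n == 0:
--         return 0
--     if n == 1:
--         return 2
--     return 2 ** n - 2 ** (n - 2) + 1
-- ===== Notes on version B (the rewrite author's own statement) =====
-- stated objective: faster
-- what changed: Replaces the O(n^2) DP-table construction and triangular summation with the closed-form answer 2**n - 2**(n-2) + 1 (the triangular sum is a geometric series), with the small and negative cases handled directly.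
import Mathlib
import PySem

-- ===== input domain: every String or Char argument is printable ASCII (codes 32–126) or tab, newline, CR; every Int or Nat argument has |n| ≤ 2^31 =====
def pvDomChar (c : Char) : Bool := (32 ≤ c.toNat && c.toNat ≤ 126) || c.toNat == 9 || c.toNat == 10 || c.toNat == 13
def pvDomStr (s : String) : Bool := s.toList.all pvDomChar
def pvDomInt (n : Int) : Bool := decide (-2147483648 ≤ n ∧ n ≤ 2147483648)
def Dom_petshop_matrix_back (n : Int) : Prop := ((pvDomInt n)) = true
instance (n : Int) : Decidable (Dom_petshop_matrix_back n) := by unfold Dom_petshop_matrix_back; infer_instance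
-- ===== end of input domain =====

-- B replaces A's O(n^2) DP table and triangular summation by the closed form
-- 2^n - 2^(n-2) + 1 (the triangular sum is a geometric series); objective: faster.

-- ===== PORT A =====
-- inner-loop body of the table fill: a[i][j] = 1 / 2**(j-1) / a[i-1][j-1]
-- (in the middle branch j ≥ 1 always holds, so (j-1).toNat is exact)
def pmFillBody (a : List (List Int)) (i j : Int) : List (List Int) :=
  PySem.List.pySetD a i (PySem.List.pySetD (PySem.List.pyGetD a i []) j
    (if j = 0 ∧ i = 0 then 1
     else if i = 0 then 2 ^ (j - 1).toNat
     else PySem.List.pyGetD (PySem.List.pyGetD a (i - 1) []) (j - 1) 0))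

-- inner-loop body of the summation: sum_3 += a[i][j]
def pmSumBody (a : List (List Int)) (i : Int) (s : Int) (j : Int) : Int :=
  s + PySem.List.pyGetD (PySem.List.pyGetD a i []) j 0

def petshop_matrix_back (n : Int) : Int :=
  if n < 0 then -1 else
    let a0 : List (List Int) :=
      (PySem.List.pyRange 0 n 1).map (fun _ => (PySem.List.pyRange 0 n 1).map (fun _ => (0 : Int)))
    let a : List (List Int) :=
      (PySem.List.pyRange 0 n 1).foldl
        (fun a i => (PySem.List.pyRange i n 1).foldl (fun a j => pmFillBody a i j) a) a0
    let sum3 : Int :=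
      (PySem.List.pyRange 2 n 1).foldl
        (fun s i => (PySem.List.pyRange i n 1).foldl (pmSumBody a i) s) 0
    let answer : Int := 2 ^ n.toNat - sum3
    if n = 0 then 0 else answer

-- ===== PORT B =====
def petshop_matrix_back_alt (n : Int) : Int :=
  if n < 0 then -1
  else if n = 0 then 0
  else if n = 1 then 2
  else 2 ^ n.toNat - 2 ^ (n - 2).toNat + 1

-- ===== PRECONDITION & SPEC =====
def Spec_petshop_matrix_back (n : Int) (out : Int) : Prop := out = petshop_matrix_back_alt n
instance (n : Int) (out : Int) : Decidable (Spec_petshop_matrix_back n out) := by unfold Spec_petshop_matrix_back; infer_instance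

-- ===== CLAIM (what is proved, stated in full; the proofs are below) =====
def Claim_equal_petshop_matrix_back : Prop := ∀ (n : Int), Dom_petshop_matrix_back n → Spec_petshop_matrix_back n (petshop_matrix_back n)

-- ===== LEMMAS AND PROOFS =====

-- the intended value of table entry (i, j)
def pvVal (i j : Nat) : Int := if j < i then 0 else if j = i then 1 else 2 ^ (j - i - 1)

def pvZrow (n : Nat) : List Int := (List.range n).map (fun _ => 0)

-- row i with positions < m already filled
def pvRow (n i m : Nat) : List Int := (List.range n).map (fun j => if j < m then pvVal i j else 0)

-- matrix state: rows < i final, row i filled below m, rows > i still zero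
def pvMat (n i m : Nat) : List (List Int) :=
  (List.range n).map (fun r => if r < i then pvRow n r n else if r = i then pvRow n i m else pvZrow n)

lemma pv_pyGetD_map_range {α : Type} (f : Nat → α) (n k : Nat) (d : α) (hk : k < n) :
    PySem.List.pyGetD ((List.range n).map f) (k : Int) d = f k := by
  simp [PySem.List.pyGetD_natCast, List.getD_eq_getElem?_getD, List.getElem?_map,
    List.getElem?_range, hk]

lemma pv_set_map_range {α : Type} (f : Nat → α) (n k : Nat) (x : α) :
    ((List.range n).map f).set k x
      = (List.range n).map (fun r => if r = k then x else f r) := by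
  apply List.ext_getElem
  · simp
  · intro i h1 h2
    simp only [List.getElem_set, List.getElem_map, List.getElem_range]
    by_cases h : k = i
    · simp [h]
    · have h' : ¬ i = k := fun hh => h hh.symm
      simp [h, h']

lemma pvRow_zero_eq_zrow (n i : Nat) : pvRow n i 0 = pvZrow n := by
  simp [pvRow, pvZrow]

lemma pvRow_self_eq_zrow (n i : Nat) : pvRow n i i = pvZrow n := by
  unfold pvRow pvZrow
  apply List.map_congr_left
  intro j _
  by_cases h : j < i
  · simp [h, pvVal]
  · simp [h]

lemma pvVal_shift (i m : Nat) (hi : 1 ≤ i) (him : i ≤ m) :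
    pvVal (i - 1) (m - 1) = pvVal i m := by
  unfold pvVal
  have h1 : ¬ (m - 1 < i - 1) := by omega
  have h2 : ¬ (m < i) := by omega
  by_cases h : m = i
  · have h3 : m - 1 = i - 1 := by omega
    simp [h, h1, h2, h3]
  · have h3 : ¬ (m - 1 = i - 1) := by omega
    have h4 : m - 1 - (i - 1) - 1 = m - i - 1 := by omega
    simp [h, h1, h2, h3, h4]

-- one fill-loop step: writing cell (i, m) into the matrix state
lemma pmFillBody_step (n i m : Nat) (hi : i < n) (him : i ≤ m) (hm : m < n) :
    pmFillBody (pvMat n i m) (i : Int) (m : Int) = pvMat n i (m + 1) := by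
  have hval : (if (m : Int) = 0 ∧ (i : Int) = 0 then (1 : Int)
      else if (i : Int) = 0 then 2 ^ ((m : Int) - 1).toNat
      else PySem.List.pyGetD (PySem.List.pyGetD (pvMat n i m) ((i : Int) - 1) []) ((m : Int) - 1) 0)
      = pvVal i m := by
    by_cases hi0 : i = 0
    · subst hi0
      by_cases hm0 : m = 0
      · subst hm0; norm_num [pvVal]
      · have hnand : ¬ ((m : Int) = 0 ∧ ((0 : Nat) : Int) = 0) := by
          intro hx
          exact hm0 (by exact_mod_cast hx.1)
        rw [if_neg hnand, if_pos (by norm_num)]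
        rw [show ((m : Int) - 1).toNat = m - 1 by omega]
        unfold pvVal
        rw [if_neg (by omega), if_neg hm0]
        norm_num
    · have hi1 : 1 ≤ i := by omega
      have hc1 : ¬ ((m : Int) = 0 ∧ (i : Int) = 0) := by
        intro hx
        exact hi0 (by exact_mod_cast hx.2)
      have hc2 : ¬ ((i : Int) = 0) := fun hx => hi0 (by exact_mod_cast hx)
      rw [if_neg hc1, if_neg hc2]
      have e1 : (i : Int) - 1 = ((i - 1 : Nat) : Int) := by omega
      have e2 : (m : Int) - 1 = ((m - 1 : Nat) : Int) := by omega
      rw [e1, e2]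
      unfold pvMat
      rw [pv_pyGetD_map_range _ n (i - 1) _ (by omega)]
      simp only [show i - 1 < i by omega, if_true]
      unfold pvRow
      rw [pv_pyGetD_map_range _ n (m - 1) _ (by omega)]
      simp only [show m - 1 < n by omega, if_true]
      exact pvVal_shift i m hi1 him
  unfold pmFillBody
  rw [hval]
  have hrow : PySem.List.pyGetD (pvMat n i m) (i : Int) [] = pvRow n i m := by
    unfold pvMat
    rw [pv_pyGetD_map_range _ n i _ hi]
    simp
  rw [hrow]
  have hset1 : PySem.List.pySetD (pvRow n i m) (m : Int) (pvVal i m) = pvRow n i (m + 1) := by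
    rw [PySem.List.pySetD_natCast]
    unfold pvRow
    rw [pv_set_map_range]
    apply List.map_congr_left
    intro j _
    by_cases h : j = m
    · simp [h]
    · have hiff : j < m ↔ j < m + 1 := by omega
      simp [h, hiff]
  rw [hset1, PySem.List.pySetD_natCast]
  unfold pvMat
  rw [pv_set_map_range]
  apply List.map_congr_left
  intro r _
  by_cases h : r = i
  · simp [h]
  · simp [h]

-- the inner fill loop completes row i
lemma pv_fill_inner (n i : Nat) (hi : i < n) :
    ∀ k m, n - m = k → i ≤ m → m ≤ n →
    (PySem.List.pyRange (m : Int) (n : Int) 1).foldl (fun a j => pmFillBody a (i : Int) j) (pvMat n i m)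
      = pvMat n i n := by
  intro k
  induction k with
  | zero =>
    intro m hk _ hmn
    have : m = n := by omega
    subst this
    rw [PySem.List.pyRange_one_eq_nil (by omega)]
    rfl
  | succ k ih =>
    intro m hk him hmn
    have hmn' : m < n := by omega
    rw [PySem.List.pyRange_one_cons (by exact_mod_cast hmn')]
    rw [List.foldl_cons, pmFillBody_step n i m hi him hmn']
    have e : (m : Int) + 1 = ((m + 1 : Nat) : Int) := by push_cast; ring
    rw [e]
    exact ih (m + 1) (by omega) (by omega) (by omega)

lemma pvMat_succ (n i : Nat) : pvMat n i n = pvMat n (i + 1) 0 := by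
  unfold pvMat
  apply List.map_congr_left
  intro r _
  by_cases h1 : r < i
  · simp [h1, show r < i + 1 by omega]
  · by_cases h2 : r = i
    · simp [h1, h2]
    · by_cases h3 : r = i + 1
      · simp [h1, h2, h3, show ¬ r < i + 1 by omega, pvRow_zero_eq_zrow]
      · simp [h1, h2, h3, show ¬ r < i + 1 by omega]

-- the outer fill loop completes the matrix
lemma pv_fill_outer (n : Nat) :
    ∀ k i, n - i = k → i ≤ n →
    (PySem.List.pyRange (i : Int) (n : Int) 1).foldl
      (fun a i => (PySem.List.pyRange i (n : Int) 1).foldl (fun a j => pmFillBody a i j) a)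
      (pvMat n i 0)
      = pvMat n n 0 := by
  intro k
  induction k with
  | zero =>
    intro i hk hin
    have : i = n := by omega
    subst this
    rw [PySem.List.pyRange_one_eq_nil (by omega)]
    rfl
  | succ k ih =>
    intro i hk hin
    have hin' : i < n := by omega
    rw [PySem.List.pyRange_one_cons (by exact_mod_cast hin')]
    rw [List.foldl_cons]
    have h0 : pvMat n i 0 = pvMat n i i := by
      unfold pvMat
      apply List.map_congr_left
      intro r _
      by_cases h : r = i <;> simp [h, pvRow_zero_eq_zrow, pvRow_self_eq_zrow]
    rw [h0, pv_fill_inner n i hin' (n - i) i rfl (by omega) (by omega), pvMat_succ]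
    have e : (i : Int) + 1 = ((i + 1 : Nat) : Int) := by push_cast; ring
    rw [e]
    exact ih (i + 1) (by omega) (by omega)

-- reading the finished matrix
lemma pv_read_final (n i j : Nat) (hi : i < n) (hj : j < n) :
    PySem.List.pyGetD (PySem.List.pyGetD (pvMat n n 0) (i : Int) []) (j : Int) 0 = pvVal i j := by
  unfold pvMat
  rw [pv_pyGetD_map_range _ n i _ hi]
  simp only [hi, if_true]
  unfold pvRow
  rw [pv_pyGetD_map_range _ n j _ hj]
  simp [hj]

-- tail sum of row i from column m: Σ_{j=m}^{n-1} pvVal i j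
def pvTail (n i m : Nat) : Int :=
  if m = i then 2 ^ (n - 1 - i) else 2 ^ (n - 1 - i) - 2 ^ (m - 1 - i)

lemma pv_sum_inner (n i : Nat) (hin : i < n) :
    ∀ k m, n - m = k → i ≤ m → m ≤ n → ∀ s : Int,
    (PySem.List.pyRange (m : Int) (n : Int) 1).foldl (pmSumBody (pvMat n n 0) (i : Int)) s
      = s + pvTail n i m := by
  intro k
  induction k with
  | zero =>
    intro m hk him hmn s
    have hmn' : m = n := by omega
    subst hmn'
    rw [PySem.List.pyRange_one_eq_nil (by omega)]
    have hne : ¬ (m = i) := by omega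
    simp [pvTail, hne]
  | succ k ih =>
    intro m hk him hmn s
    have hmn' : m < n := by omega
    rw [PySem.List.pyRange_one_cons (by exact_mod_cast hmn'), List.foldl_cons]
    have hbody : pmSumBody (pvMat n n 0) (i : Int) s (m : Int) = s + pvVal i m := by
      unfold pmSumBody
      rw [pv_read_final n i m hin hmn']
    rw [hbody]
    have e : (m : Int) + 1 = ((m + 1 : Nat) : Int) := by push_cast; ring
    rw [e, ih (m + 1) (by omega) (by omega) (by omega)]
    have harith : pvVal i m + pvTail n i (m + 1) = pvTail n i m := by
      unfold pvVal pvTail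
      by_cases h : m = i
      · have h2 : ¬ (m + 1 = i) := by omega
        have h3 : ¬ (m < i) := by omega
        rw [if_neg h3, if_pos h, if_neg h2, if_pos h,
          show m + 1 - 1 - i = 0 by omega, pow_zero]
        ring
      · have h1 : ¬ (m < i) := by omega
        have h2 : ¬ (m + 1 = i) := by omega
        rw [if_neg h1, if_neg h, if_neg h2, if_neg h,
          show m + 1 - 1 - i = (m - 1 - i) + 1 by omega, pow_succ,
          show m - i - 1 = m - 1 - i by omega]
        ring
    linarith [harith]

lemma pv_sum_outer (n : Nat) (hn : 2 ≤ n) :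
    ∀ k i, n - i = k → 2 ≤ i → i ≤ n → ∀ s : Int,
    (PySem.List.pyRange (i : Int) (n : Int) 1).foldl
      (fun s i => (PySem.List.pyRange i (n : Int) 1).foldl (pmSumBody (pvMat n n 0) i) s) s
      = s + 2 ^ (n - i) - 1 := by
  intro k
  induction k with
  | zero =>
    intro i hk _ hin s
    have : i = n := by omega
    subst this
    rw [PySem.List.pyRange_one_eq_nil (by omega)]
    simp
  | succ k ih =>
    intro i hk hi2 hin s
    have hin' : i < n := by omega
    rw [PySem.List.pyRange_one_cons (by exact_mod_cast hin'), List.foldl_cons]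
    rw [pv_sum_inner n i hin' (n - i) i rfl (by omega) (by omega) s]
    have e : (i : Int) + 1 = ((i + 1 : Nat) : Int) := by push_cast; ring
    rw [e, ih (i + 1) (by omega) (by omega) (by omega)]
    have h1 : pvTail n i i = 2 ^ (n - 1 - i) := by simp [pvTail]
    rw [h1]
    have e1 : n - i = (n - 1 - i) + 1 := by omega
    have e2 : n - (i + 1) = n - 1 - i := by omega
    rw [e1, e2, pow_succ]
    ring

lemma pv_a0_eq_pvMat (n : Nat) :
    ((PySem.List.pyRange 0 (n : Int) 1).map
        (fun _ => (PySem.List.pyRange 0 (n : Int) 1).map (fun _ => (0 : Int))))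
      = pvMat n 0 0 := by
  rw [PySem.List.pyRange_one]
  have hn : (((n : Int) - 0).toNat) = n := by omega
  rw [hn, List.map_map]
  unfold pvMat
  apply List.map_congr_left
  intro r _
  by_cases h : r = 0 <;>
    simp [h, pvRow_zero_eq_zrow, pvZrow, Function.comp_def]

-- ===== VERDICT (by name: the statement is the Claim_ definition above) =====
theorem petshop_matrix_back_spec : Claim_equal_petshop_matrix_back := by
  unfold Claim_equal_petshop_matrix_back
  intro n _
  unfold Spec_petshop_matrix_back
  by_cases hneg : n < 0
  · simp [petshop_matrix_back, petshop_matrix_back_alt, hneg]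
  · by_cases h0 : n = 0
    · subst h0; decide
    · by_cases h1 : n = 1
      · subst h1; decide
      · -- n ≥ 2
        have hn2 : 2 ≤ n := by omega
        have hnm : n = ((n.toNat : Nat) : Int) := by omega
        have hm2 : 2 ≤ n.toNat := by omega
        unfold petshop_matrix_back petshop_matrix_back_alt
        simp only [hneg, h0, h1, if_false]
        rw [hnm, pv_a0_eq_pvMat n.toNat]
        have hfill := pv_fill_outer n.toNat n.toNat 0 (by omega) (by omega)
        simp only [Nat.cast_zero] at hfill
        rw [hfill]
        have hsum := pv_sum_outer n.toNat hm2 (n.toNat - 2) 2 (by omega) (by omega) (by omega) 0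
        simp only [Nat.cast_ofNat] at hsum
        rw [hsum]
        have e1 : (((n.toNat : Nat) : Int)).toNat = n.toNat := by omega
        have e2 : (((n.toNat : Nat) : Int) - 2).toNat = n.toNat - 2 := by omega
        rw [e1, e2]
        ring
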